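-- pv_equiv track=rewrite | github.com/aaazjf/travel-map-agent | src/agent_core/context_manager.py | _fit_from_end
-- ===== SOURCE A (Python) =====
-- def estimate_tokens(text: str) -> int:
--   if not text:
--     return 0
--   # Lightweight approximation without external tokenizer dependency.
--   # Works reasonably for mixed Chinese/English product logs.
--   return max(1, (len(text) + 3) // 4)
--
-- def _fit_from_end(lines: list[str], budget_tokens: int) -> tuple[str, int, int]:
--   taken: list[str] = []
--   used_tokens = 0
--   count = 0
--   for line in reversed(lines):
--     add = estimate_tokens(line + "\n")
--     if used_tokens + add > budget_tokens:
--       break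
--     taken.append(line)
--     used_tokens += add
--     count += 1
--   taken.reverse()
--   text = "\n".join(taken)
--   return text, count, estimate_tokens(text)
-- ===== SOURCE B (Python) =====
-- def estimate_tokens(text: str) -> int:
--   if not text:
--     return 0
--   return max(1, (len(text) + 3) // 4)
--
-- def _fit_from_end(lines: list[str], budget_tokens: int) -> tuple[str, int, int]:
--   # Prefix sums of per-line costs (taken from the end), then binary search
--   # for the number of trailing lines that fit, then one slice.
--   sums = []
--   total = 0
--   for line in reversed(lines):
--     total += (len(line) + 4) // 4   # == estimate_tokens(line + "\n")
--     sums.append(total)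
--   lo, hi = 0, len(sums)
--   while lo < hi:                    # k = number of prefix sums <= budget
--     mid = (lo + hi) // 2
--     if sums[mid] <= budget_tokens:
--       lo = mid + 1
--     else:
--       hi = mid
--   k = lo
--   taken = lines[len(lines) - k:]
--   text = "\n".join(taken)
--   return text, k, estimate_tokens(text)
-- ===== Notes on version B (the rewrite author's own statement) =====
-- stated objective: alternative
-- what changed: Replaces A's accumulate-and-break reverse scan with building a prefix-sum table of per-line costs, binary-searching it for the number k of trailing lines whose cumulative cost fits the budget (valid because each cost is >= 1, so the sums are strictly increasing), and slicing the last k lines in one step.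
import Mathlib
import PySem

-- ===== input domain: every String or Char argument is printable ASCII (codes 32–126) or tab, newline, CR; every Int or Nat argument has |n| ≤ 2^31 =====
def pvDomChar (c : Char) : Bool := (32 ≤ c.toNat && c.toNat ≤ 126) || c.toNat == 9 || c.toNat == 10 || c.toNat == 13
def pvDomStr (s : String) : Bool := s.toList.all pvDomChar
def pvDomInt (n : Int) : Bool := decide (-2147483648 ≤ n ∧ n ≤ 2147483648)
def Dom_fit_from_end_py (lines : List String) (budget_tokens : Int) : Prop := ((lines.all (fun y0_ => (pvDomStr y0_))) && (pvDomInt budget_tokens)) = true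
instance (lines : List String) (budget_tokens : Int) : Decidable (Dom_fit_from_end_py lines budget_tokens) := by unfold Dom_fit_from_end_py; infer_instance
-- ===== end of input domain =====

-- B replaces A's accumulate-and-break scan by a prefix-sum table + binary search + one slice (alternative decomposition, same cost).


-- ===== PORT A =====
-- estimate_tokens, over code points (exact: Python len(str) counts code points)
def pyEstimateTokens (cs : List Char) : Int :=
  if cs = [] then 0 else max 1 (PySem.Int.floordiv ((cs.length : Int) + 3) 4)

-- A's for-loop over reversed(lines) with its break, state (taken, used, count)
def fitLoopA (budget : Int) : List String → List String → Int → Int → (List String × Int × Int)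
  | [], taken, used, count => (taken, used, count)
  | line :: rest, taken, used, count =>
    let add := pyEstimateTokens (line.toList ++ ['\n'])
    if budget < used + add then (taken, used, count)
    else fitLoopA budget rest (taken ++ [line]) (used + add) (count + 1)

def fit_from_end_py (lines : List String) (budget_tokens : Int) : String × Int × Int :=
  let r := fitLoopA budget_tokens lines.reverse [] 0 0
  let taken := r.1.reverse
  let text := PySem.Str.join "\n" taken
  (text, r.2.2, pyEstimateTokens text.toList)

-- ===== PORT B =====
-- Source B's first loop: prefix sums of per-line costs over reversed(lines)
def sumsLoopB (lines : List String) : List Int × Int :=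
  lines.reverse.foldl
    (fun (p : List Int × Int) line =>
      let t := p.2 + PySem.Int.floordiv (PySem.Str.len line + 4) 4
      (p.1 ++ [t], t)) ([], 0)

-- Source B's while-loop binary search (lo, hi are nonnegative ints, so Nat; sums[mid] is in range whenever lo < hi ≤ len)
def bsearchB (sums : List Int) (budget : Int) (lo hi : Nat) : Nat :=
  if lo < hi then
    let mid := (lo + hi) / 2
    if sums.getD mid 0 ≤ budget then bsearchB sums budget (mid + 1) hi
    else bsearchB sums budget lo mid
  else lo
termination_by hi - lo
decreasing_by all_goals omega

def fit_from_end_py_alt (lines : List String) (budget_tokens : Int) : String × Int × Int :=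
  let sums := (sumsLoopB lines).1
  let k := bsearchB sums budget_tokens 0 sums.length
  let taken := PySem.List.slice lines (some ((lines.length : Int) - (k : Int))) none
  let text := PySem.Str.join "\n" taken
  (text, (k : Int), pyEstimateTokens text.toList)

-- ===== PRECONDITION & SPEC =====
def Spec_fit_from_end_py (lines : List String) (budget_tokens : Int) (out : String × Int × Int) : Prop := out = fit_from_end_py_alt lines budget_tokens
instance (lines : List String) (budget_tokens : Int) (out : String × Int × Int) : Decidable (Spec_fit_from_end_py lines budget_tokens out) := by unfold Spec_fit_from_end_py; infer_instance

-- ===== CLAIM (what is proved, stated in full; the proofs are below) =====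
def Claim_equal_fit_from_end_py : Prop := ∀ (lines : List String) (budget_tokens : Int), Dom_fit_from_end_py lines budget_tokens → Spec_fit_from_end_py lines budget_tokens (fit_from_end_py lines budget_tokens)

-- ===== LEMMAS AND PROOFS =====

-- cost of one line (B's formulation)
def lineCost (line : String) : Int := PySem.Int.floordiv ((line.toList.length : Int) + 4) 4

lemma lineCost_natCast (line : String) :
    lineCost line = ((line.toList.length + 4) / 4 : Nat) := by
  unfold lineCost
  have : ((line.toList.length : Int) + 4) = ((line.toList.length + 4 : Nat) : Int) := by norm_cast
  rw [this]
  exact_mod_cast PySem.Int.floordiv_natCast (line.toList.length + 4) 4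

lemma lineCost_pos (line : String) : 1 ≤ lineCost line := by
  rw [lineCost_natCast]
  have : 1 ≤ (line.toList.length + 4) / 4 := by omega
  exact_mod_cast this

lemma cost_eq (line : String) :
    pyEstimateTokens (line.toList ++ ['\n']) = lineCost line := by
  unfold pyEstimateTokens
  rw [if_neg (by simp)]
  rw [lineCost_natCast]
  have h1 : (((line.toList ++ ['\n']).length : Int) + 3) = ((line.toList.length + 4 : Nat) : Int) := by
    simp; omega
  rw [h1]
  rw [show PySem.Int.floordiv ((line.toList.length + 4 : Nat) : Int) 4
        = ((line.toList.length + 4) / 4 : Nat) from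
      by exact_mod_cast PySem.Int.floordiv_natCast (line.toList.length + 4) 4]
  have : 1 ≤ (line.toList.length + 4) / 4 := by omega
  have h2 : (1 : Int) ≤ ((line.toList.length + 4) / 4 : Nat) := by exact_mod_cast this
  omega

-- spec-level greedy prefix of A's loop
def greedy (b : Int) : List String → Int → List String
  | [], _ => []
  | x :: xs, u => if b < u + lineCost x then [] else x :: greedy b xs (u + lineCost x)

lemma fitLoopA_eq (b : Int) (l : List String) :
    ∀ (taken : List String) (u c : Int),
      (fitLoopA b l taken u c).1 = taken ++ greedy b l u ∧
      (fitLoopA b l taken u c).2.2 = c + ((greedy b l u).length : Int) := by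
  induction l with
  | nil => intro taken u c; simp [fitLoopA, greedy]
  | cons x xs ih =>
    intro taken u c
    simp only [fitLoopA, greedy, cost_eq]
    by_cases h : b < u + lineCost x
    · simp [h]
    · rw [if_neg h, if_neg h]
      obtain ⟨h1, h2⟩ := ih (taken ++ [x]) (u + lineCost x) (c + 1)
      refine ⟨?_, ?_⟩
      · rw [h1]; simp
      · rw [h2]; simp only [List.length_cons]; push_cast; ring

lemma greedy_eq_take (b : Int) (l : List String) (u : Int) :
    greedy b l u = l.take (greedy b l u).length := by
  induction l generalizing u with
  | nil => simp [greedy]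
  | cons x xs ih =>
    simp only [greedy]
    split_ifs with h
    · simp
    · simp [List.take_succ_cons, ← ih (u + lineCost x)]

-- spec-level prefix sums of B's first loop
def psums : List String → Int → List Int
  | [], _ => []
  | x :: xs, u => (u + lineCost x) :: psums xs (u + lineCost x)

lemma sumsLoop_eq (l : List String) :
    ∀ (acc : List Int) (u : Int),
      (l.foldl (fun (p : List Int × Int) line =>
        let t := p.2 + PySem.Int.floordiv (PySem.Str.len line + 4) 4
        (p.1 ++ [t], t)) (acc, u)).1 = acc ++ psums l u := by
  induction l with
  | nil => intro acc u; simp [psums]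
  | cons x xs ih =>
    intro acc u
    have hc : PySem.Int.floordiv (PySem.Str.len x + 4) 4 = lineCost x := by
      simp [PySem.Str.len_eq, lineCost]
    simp only [List.foldl_cons, psums, hc]
    rw [ih (acc ++ [u + lineCost x]) (u + lineCost x)]
    simp

lemma psums_length (l : List String) (u : Int) : (psums l u).length = l.length := by
  induction l generalizing u with
  | nil => rfl
  | cons x xs ih => simp [psums, ih]

lemma psums_mem_le (l : List String) (u : Int) : ∀ y ∈ psums l u, u + 1 ≤ y := by
  induction l generalizing u with
  | nil => simp [psums]
  | cons x xs ih =>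
    intro y hy
    simp only [psums, List.mem_cons] at hy
    rcases hy with rfl | hy
    · have := lineCost_pos x; omega
    · have := ih (u + lineCost x) y hy
      have := lineCost_pos x; omega

lemma psums_pairwise (l : List String) (u : Int) : (psums l u).Pairwise (· ≤ ·) := by
  induction l generalizing u with
  | nil => simp [psums]
  | cons x xs ih =>
    simp only [psums]
    refine List.Pairwise.cons ?_ (ih _)
    intro y hy
    have := psums_mem_le xs (u + lineCost x) y hy; omega

lemma greedy_length_eq_takeWhile (b : Int) (l : List String) (u : Int) :
    (greedy b l u).length = ((psums l u).takeWhile (fun t => decide (t ≤ b))).length := by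
  induction l generalizing u with
  | nil => simp [greedy, psums]
  | cons x xs ih =>
    simp only [greedy, psums, List.takeWhile_cons]
    by_cases h : b < u + lineCost x
    · rw [if_pos h, if_neg (by simp; omega)]
      simp
    · rw [if_neg h, if_pos (by simp; omega)]
      simp [ih (u + lineCost x)]

-- characterisation of the takeWhile boundary on a sorted list
lemma takeWhile_le_spec (xs : List Int) (b : Int) (hmono : xs.Pairwise (· ≤ ·)) :
    (∀ i, i < (xs.takeWhile (fun t => decide (t ≤ b))).length → xs.getD i 0 ≤ b) ∧
    (∀ i, (xs.takeWhile (fun t => decide (t ≤ b))).length ≤ i → i < xs.length → b < xs.getD i 0) := by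
  induction xs with
  | nil => simp
  | cons x xs ih =>
    obtain ⟨hx, hxs⟩ := List.pairwise_cons.mp hmono
    obtain ⟨ih1, ih2⟩ := ih hxs
    simp only [List.takeWhile_cons]
    by_cases h : x ≤ b
    · rw [if_pos (by simpa)]
      constructor
      · intro i hi
        cases i with
        | zero => simpa [List.getD_cons_zero]
        | succ j =>
          simp only [List.length_cons] at hi
          have := ih1 j (by omega)
          simpa [List.getD_cons_succ] using this
      · intro i hi hlen
        cases i with
        | zero => simp at hi
        | succ j =>
          simp only [List.length_cons] at hi hlen
          have := ih2 j (by omega) (by omega)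
          simpa [List.getD_cons_succ] using this
    · rw [if_neg (by simp; omega)]
      refine ⟨by simp, ?_⟩
      intro i _ hlen
      cases i with
      | zero => simp only [List.getD_cons_zero]; omega
      | succ j =>
        simp only [List.length_cons] at hlen
        have hj : xs.getD j 0 ∈ xs := by
          have : j < xs.length := by omega
          rw [List.getD_eq_getElem xs 0 this]
          exact List.getElem_mem this
        have := hx _ hj
        simp only [List.getD_cons_succ]
        omega

lemma bsearch_eq_aux (xs : List Int) (b : Int) (t : Nat)
    (hlow : ∀ i, i < t → xs.getD i 0 ≤ b)
    (hhigh : ∀ i, t ≤ i → i < xs.length → b < xs.getD i 0) :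
    ∀ n lo hi, hi - lo ≤ n → lo ≤ t → t ≤ hi → hi ≤ xs.length → bsearchB xs b lo hi = t := by
  intro n
  induction n with
  | zero =>
    intro lo hi hn hlo hhi _
    rw [bsearchB]
    rw [if_neg (by omega)]
    omega
  | succ m ih =>
    intro lo hi hn hlo hhi hlen
    rw [bsearchB]
    by_cases hlt : lo < hi
    · rw [if_pos hlt]
      set mid := (lo + hi) / 2 with hmid
      have hm1 : lo ≤ mid := by omega
      have hm2 : mid < hi := by omega
      by_cases hv : xs.getD mid 0 ≤ b
      · rw [if_pos hv]
        have hmt : mid < t := by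
          by_contra hc
          exact absurd hv (not_le.mpr (hhigh mid (by omega) (by omega)))
        exact ih (mid + 1) hi (by omega) (by omega) hhi hlen
      · rw [if_neg hv]
        have hmt : t ≤ mid := by
          by_contra hc
          exact hv (hlow mid (by omega))
        exact ih lo mid (by omega) hlo hmt (by omega)
    · rw [if_neg hlt]; omega

lemma take_length_le {α : Type} (l : List α) (p : α → Bool) :
    (l.takeWhile p).length ≤ l.length :=
  (List.takeWhile_sublist p).length_le

theorem fit_main (lines : List String) (b : Int) :
    fit_from_end_py lines b = fit_from_end_py_alt lines b := by
  unfold fit_from_end_py fit_from_end_py_alt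
  -- identify B's sums with psums
  have hsums : (sumsLoopB lines).1 = psums lines.reverse 0 := by
    unfold sumsLoopB
    exact (sumsLoop_eq lines.reverse [] 0).trans (by simp)
  set ps := psums lines.reverse 0 with hps
  have hlen : ps.length = lines.length := by rw [hps, psums_length]; simp
  -- t = greedy length = takeWhile length
  set t := ((ps.takeWhile (fun x => decide (x ≤ b))).length) with hT
  have htle : t ≤ lines.length := by
    have := take_length_le ps (fun x => decide (x ≤ b)); omega
  have hgl : (greedy b lines.reverse 0).length = t := by
    rw [hT, hps]; exact greedy_length_eq_takeWhile b lines.reverse 0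
  -- binary search returns t
  obtain ⟨hlow, hhigh⟩ := takeWhile_le_spec ps b (psums_pairwise lines.reverse 0)
  have hk : bsearchB (sumsLoopB lines).1 b 0 (sumsLoopB lines).1.length = t := by
    rw [hsums]
    exact bsearch_eq_aux ps b t hlow hhigh ps.length 0 ps.length (by omega) (by omega)
      (by omega) (le_refl _)
  -- A's taken list equals B's slice
  obtain ⟨hA1, hA2⟩ := fitLoopA_eq b lines.reverse [] 0 0
  have htakenA : (fitLoopA b lines.reverse [] 0 0).1.reverse = lines.drop (lines.length - t) := by
    rw [hA1]
    simp only [List.nil_append]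
    rw [greedy_eq_take b lines.reverse 0, hgl]
    rw [List.take_reverse]
    simp
  have hsliceB : PySem.List.slice lines (some ((lines.length : Int) - (t : Int))) none
      = lines.drop (lines.length - t) := by
    have h0 : (0 : Int) ≤ (lines.length : Int) - (t : Int) := by
      have : (t : Int) ≤ (lines.length : Int) := by exact_mod_cast htle
      omega
    rw [PySem.List.slice_from _ h0]
    congr 1
    omega
  simp only [hk, htakenA, hsliceB, hA2, hgl]
  simp

-- ===== VERDICT (by name: the statement is the Claim_ definition above) =====
theorem fit_from_end_py_spec : Claim_equal_fit_from_end_py := by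
  intro lines b _
  unfold Spec_fit_from_end_py
  exact fit_main lines b
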